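-- pv_equiv track=rewrite | github.com/pypi-data/pypi-mirror-348 | packages/translit-me/translit_me-1.3-py3-none-any.whl/translit_me/transliterator.py | recursive_word_assembler
-- ===== SOURCE A (Python) =====
-- def recursive_word_assembler(current_word, remaining_arrays):
--     res = []
--     arr = []
--     if len(remaining_arrays) == 1:
--         arr = remaining_arrays[0]
--     else:
--         for word in remaining_arrays[0]:
--             arr += recursive_word_assembler(word, remaining_arrays[1:])
--
--     for word in arr:
--         res.append(current_word + " " + word)
--
--     return res
-- ===== SOURCE B (Python) =====
-- def recursive_word_assembler(current_word, remaining_arrays):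
--     results = [current_word + " " + w for w in remaining_arrays[0]]
--     for array in remaining_arrays[1:]:
--         results = [r + " " + w for r in results for w in array]
--     return results
-- ===== Notes on version B (the rewrite author's own statement) =====
-- stated objective: simpler
-- what changed: Replaces the recursion into remaining_arrays[1:] (with repeated list concatenation and a final mapping pass) by a single iterative left-to-right fold that maintains the list of partial product strings.
-- outside the precondition, e.g. on recursive_word_assembler('x', []): A raises IndexError, B raises IndexError
import Mathlib
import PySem

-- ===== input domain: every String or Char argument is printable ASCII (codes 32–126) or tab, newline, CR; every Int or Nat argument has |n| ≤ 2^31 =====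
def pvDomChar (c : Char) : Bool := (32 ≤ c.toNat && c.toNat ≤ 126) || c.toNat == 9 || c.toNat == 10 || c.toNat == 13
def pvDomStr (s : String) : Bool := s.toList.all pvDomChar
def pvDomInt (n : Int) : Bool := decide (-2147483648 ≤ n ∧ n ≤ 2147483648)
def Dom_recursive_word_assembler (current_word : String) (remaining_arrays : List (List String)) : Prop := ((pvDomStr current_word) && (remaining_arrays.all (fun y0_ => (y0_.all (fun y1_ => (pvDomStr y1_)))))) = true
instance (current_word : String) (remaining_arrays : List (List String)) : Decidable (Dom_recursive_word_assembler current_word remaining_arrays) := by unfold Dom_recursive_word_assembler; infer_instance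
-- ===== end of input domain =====

-- B replaces A's recursion over remaining_arrays[1:] by one iterative left-to-right fold
-- maintaining the list of partial product strings (objective: simpler).


-- ===== PORT A =====
-- the 'for word in remaining_arrays[0]: arr += recursive_word_assembler(word, remaining_arrays[1:])' loop
mutual
def pvALoop (words : List String) (tail : List (List String)) : List String :=
  match words with
  | [] => []
  | w :: ws => recursive_word_assembler w tail ++ pvALoop ws tail
termination_by (tail.length, words.length + 1)

def recursive_word_assembler (current_word : String) (remaining_arrays : List (List String)) : List String :=
  -- compute arr (the [] case is where Python raises IndexError; outside Pre_)
  (match remaining_arrays with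
   | [] => []
   | [a0] => a0
   | a0 :: tail => pvALoop a0 tail
  ).map (fun word => current_word ++ " " ++ word)
termination_by (remaining_arrays.length, 0)
end

-- ===== PORT B =====
def recursive_word_assembler_alt (current_word : String) (remaining_arrays : List (List String)) : List String :=
  match remaining_arrays with
  | [] => []  -- Python B raises IndexError here; outside Pre_
  | a0 :: rest =>
    rest.foldl (fun results array => results.flatMap (fun r => array.map (fun w => r ++ " " ++ w)))
      (a0.map (fun w => current_word ++ " " ++ w))

-- ===== PRECONDITION & SPEC =====
-- Pre_ excludes only remaining_arrays = [], on which both Pythons raise IndexError.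
def Pre_recursive_word_assembler (current_word : String) (remaining_arrays : List (List String)) : Prop := remaining_arrays ≠ []
instance (current_word : String) (remaining_arrays : List (List String)) : Decidable (Pre_recursive_word_assembler current_word remaining_arrays) := by unfold Pre_recursive_word_assembler; infer_instance
def pvWitness_recursive_word_assembler : String × List (List String) := ("x", [["a", "b"], ["c"]])

def Spec_recursive_word_assembler (current_word : String) (remaining_arrays : List (List String)) (out : List String) : Prop := out = recursive_word_assembler_alt current_word remaining_arrays
instance (current_word : String) (remaining_arrays : List (List String)) (out : List String) : Decidable (Spec_recursive_word_assembler current_word remaining_arrays out) := by unfold Spec_recursive_word_assembler; infer_instance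

-- ===== CLAIM (what is proved, stated in full; the proofs are below) =====
def Claim_equal_recursive_word_assembler : Prop := ∀ (current_word : String) (remaining_arrays : List (List String)), Dom_recursive_word_assembler current_word remaining_arrays → Pre_recursive_word_assembler current_word remaining_arrays → Spec_recursive_word_assembler current_word remaining_arrays (recursive_word_assembler current_word remaining_arrays)

-- ===== LEMMAS AND PROOFS =====

-- common specification: all ' '-joined extensions of s by one word from each array
def pvExt (s : String) : List (List String) → List String
  | [] => [s]
  | a :: rest => a.flatMap (fun w => pvExt (s ++ " " ++ w) rest)

theorem pvExt_map (l : List (List String)) (p : String) : ∀ s, (pvExt s l).map (fun x => p ++ x) = pvExt (p ++ s) l := by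
  induction l with
  | nil => intro s; simp [pvExt]
  | cons a rest ih =>
    intro s
    simp only [pvExt, List.map_flatMap]
    refine List.flatMap_congr (fun w _ => ?_)
    rw [ih]
    simp [String.append_assoc]

theorem pvALoop_eq (words : List String) (tail : List (List String)) :
    pvALoop words tail = words.flatMap (fun w => recursive_word_assembler w tail) := by
  induction words with
  | nil => simp [pvALoop]
  | cons w ws ih => simp [pvALoop, ih]

theorem A_eq_ext : ∀ (l : List (List String)), l ≠ [] → ∀ cw, recursive_word_assembler cw l = pvExt cw l := by
  intro l
  induction l with
  | nil => intro h; exact absurd rfl h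
  | cons a0 tail ih =>
    intro _ cw
    cases tail with
    | nil =>
      rw [recursive_word_assembler]
      simp only [pvExt]
      induction a0 with
      | nil => rfl
      | cons x xs ihx => simp_all
    | cons b rest =>
      rw [recursive_word_assembler, pvALoop_eq]
      simp only [List.map_flatMap, pvExt]
      refine List.flatMap_congr (fun w _ => ?_)
      rw [ih (fun h => (List.cons_ne_nil b rest) h) w]
      have h1 := pvExt_map (b :: rest) (cw ++ " ") w
      simp only [String.append_assoc] at h1 ⊢
      rw [h1]
      · simp [pvExt, String.append_assoc]
      · exact fun h => by cases h

theorem B_fold_eq (l : List (List String)) : ∀ (init : List String),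
    l.foldl (fun results array => results.flatMap (fun r => array.map (fun w => r ++ " " ++ w))) init
      = init.flatMap (fun r => pvExt r l) := by
  induction l with
  | nil => intro init; simp [pvExt]
  | cons a rest ih =>
    intro init
    rw [List.foldl_cons, ih]
    simp [pvExt, List.flatMap_assoc, List.flatMap_map]

theorem B_eq_ext (cw : String) (l : List (List String)) (h : l ≠ []) :
    recursive_word_assembler_alt cw l = pvExt cw l := by
  cases l with
  | nil => exact absurd rfl h
  | cons a0 rest =>
    rw [recursive_word_assembler_alt, B_fold_eq]
    simp [pvExt, List.flatMap_map]

-- ===== VERDICT (by name: the statement is the Claim_ definition above) =====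
theorem recursive_word_assembler_spec : Claim_equal_recursive_word_assembler := by
  intro cw l _ hpre
  unfold Spec_recursive_word_assembler
  rw [A_eq_ext l hpre cw, B_eq_ext cw l hpre]
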